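-- pv_equiv track=rewrite | github.com/Cobular/2024_wash_vote | clean.py | process_markdown
-- ===== SOURCE A (Python) =====
-- from typing import List, Tuple
--
-- def process_markdown(content: str) -> str:
--     lines: List[str] = content.split('\n')
--     first_h1_found: bool = False
--     processed_lines: List[str] = []
--
--     for line in lines:
--         if line.strip().startswith('# '):
--             if not first_h1_found:
--                 processed_lines.append(line)
--                 first_h1_found = True
--         else:
--             processed_lines.append(line)
--
--     return '\n'.join(processed_lines)
-- ===== SOURCE B (Python) =====
-- def process_markdown(content: str) -> str:
--     lines = content.split('\n')
--     first_idx = next((i for i, l in enumerate(lines) if l.strip().startswith('# ')), None)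
--     return '\n'.join(l for i, l in enumerate(lines)
--                      if not l.strip().startswith('# ') or i == first_idx)
-- ===== Notes on version B (the rewrite author's own statement) =====
-- stated objective: alternative
-- what changed: Replaces the single pass carrying a running first-H1-seen boolean flag by two passes: first precompute the index of the first H1 line, then filter by comparing each line's index against it.
import Mathlib
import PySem

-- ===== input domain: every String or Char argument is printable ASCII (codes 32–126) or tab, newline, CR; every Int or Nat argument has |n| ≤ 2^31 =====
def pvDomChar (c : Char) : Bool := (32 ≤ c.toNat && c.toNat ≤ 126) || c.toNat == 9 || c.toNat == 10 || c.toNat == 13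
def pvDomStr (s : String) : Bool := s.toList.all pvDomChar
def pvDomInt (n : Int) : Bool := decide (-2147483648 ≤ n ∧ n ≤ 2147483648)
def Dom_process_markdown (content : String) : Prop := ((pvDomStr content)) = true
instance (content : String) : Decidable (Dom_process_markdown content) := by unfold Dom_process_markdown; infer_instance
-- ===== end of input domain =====

-- B replaces A's running first-H1-seen boolean flag by a precomputed index of the first H1
-- line and an index-comparing filter (alternative decomposition, same cost).

-- the H1 test both Pythons spell identically: line.strip().startswith('# ')
def pvIsH1 (l : String) : Bool := PySem.Str.startswith (PySem.Str.strip l) "# "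

-- ===== PORT A =====
def process_markdown (content : String) : String :=
  let lines : List String := (PySem.Str.split? content "\n").getD []  -- sep ≠ "", so split? is always some
  let st := lines.foldl
    (fun (st : Bool × List String) line =>
      if pvIsH1 line then
        if !st.1 then (true, st.2 ++ [line]) else st
      else (st.1, st.2 ++ [line]))
    (false, ([] : List String))
  PySem.Str.join "\n" st.2

-- ===== PORT B =====
def process_markdown_alt (content : String) : String :=
  let lines : List String := (PySem.Str.split? content "\n").getD []  -- sep ≠ "", so split? is always some
  let firstIdx : Option Int :=
    ((PySem.List.enumerate lines).find? (fun p => pvIsH1 p.2)).map (·.1)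
  PySem.Str.join "\n"
    (((PySem.List.enumerate lines).filter
        (fun p => !pvIsH1 p.2 || firstIdx == some p.1)).map (·.2))

-- ===== PRECONDITION & SPEC =====
def Spec_process_markdown (content : String) (out : String) : Prop := out = process_markdown_alt content
instance (content : String) (out : String) : Decidable (Spec_process_markdown content out) := by unfold Spec_process_markdown; infer_instance

-- ===== CLAIM (what is proved, stated in full; the proofs are below) =====
def Claim_equal_process_markdown : Prop := ∀ (content : String), Dom_process_markdown content → Spec_process_markdown content (process_markdown content)

-- ===== LEMMAS AND PROOFS =====

-- once the flag is true, A's loop keeps exactly the non-H1 lines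
theorem pvFlagTrue (ls : List String) (acc : List String) :
    (ls.foldl
      (fun (st : Bool × List String) line =>
        if pvIsH1 line then
          if !st.1 then (true, st.2 ++ [line]) else st
        else (st.1, st.2 ++ [line]))
      (true, acc)) = (true, acc ++ ls.filter (fun l => !pvIsH1 l)) := by
  induction ls generalizing acc with
  | nil => simp
  | cons l t ih =>
    rw [List.foldl_cons]
    by_cases h : pvIsH1 l = true
    · rw [show (if pvIsH1 l = true then
            if (!(true, acc).1) = true then (true, (true, acc).2 ++ [l]) else (true, acc)
          else ((true, acc).1, (true, acc).2 ++ [l])) = ((true : Bool), acc) from by simp [h]]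
      rw [ih]; simp [h]
    · rw [show (if pvIsH1 l = true then
            if (!(true, acc).1) = true then (true, (true, acc).2 ++ [l]) else (true, acc)
          else ((true, acc).1, (true, acc).2 ++ [l])) = ((true : Bool), acc ++ [l]) from by simp [h]]
      rw [ih]; simp [h]

-- filtering enumerate on a snd-only predicate then projecting snd is filtering the list
theorem pvFilterEnum (t : List String) (s : Int) :
    (((PySem.List.enumerate t s).filter (fun p => !pvIsH1 p.2)).map (·.2))
      = t.filter (fun l => !pvIsH1 l) := by
  induction t generalizing s with
  | nil => simp [PySem.List.enumerate_nil]
  | cons l t ih =>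
    by_cases h : pvIsH1 l = true <;>
      simp [PySem.List.enumerate_cons, h, ih]

-- main invariant: A's flag-false loop computes B's index-filtered selection, for any offset
theorem pvMain (ls : List String) (s : Int) (acc : List String) :
    (ls.foldl
      (fun (st : Bool × List String) line =>
        if pvIsH1 line then
          if !st.1 then (true, st.2 ++ [line]) else st
        else (st.1, st.2 ++ [line]))
      (false, acc)).2
    = acc ++ (((PySem.List.enumerate ls s).filter
        (fun p => !pvIsH1 p.2 ||
          (((PySem.List.enumerate ls s).find? (fun q => pvIsH1 q.2)).map (·.1)) == some p.1)).map (·.2)) := by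
  induction ls generalizing s acc with
  | nil => simp [PySem.List.enumerate_nil]
  | cons l t ih =>
    rw [List.foldl_cons]
    by_cases h : pvIsH1 l = true
    · rw [show (if pvIsH1 l = true then
            if (!(false, acc).1) = true then (true, (false, acc).2 ++ [l]) else (false, acc)
          else ((false, acc).1, (false, acc).2 ++ [l])) = ((true : Bool), acc ++ [l]) from by simp [h]]
      rw [pvFlagTrue]
      simp [PySem.List.enumerate_cons, h]
      have hcong : (PySem.List.enumerate t (s + 1)).filter (fun p => !pvIsH1 p.2 || s == p.1)
          = (PySem.List.enumerate t (s + 1)).filter (fun p => !pvIsH1 p.2) := by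
        apply List.filter_congr
        intro p hp
        rcases (PySem.List.mem_enumerate_iff _ _ _).1 hp with ⟨k, hk, rfl⟩
        have hne : s ≠ s + 1 + (k : Int) := by omega
        simp [hne]
      rw [hcong, pvFilterEnum]
    · rw [show (if pvIsH1 l = true then
            if (!(false, acc).1) = true then (true, (false, acc).2 ++ [l]) else (false, acc)
          else ((false, acc).1, (false, acc).2 ++ [l])) = ((false : Bool), acc ++ [l]) from by simp [h]]
      rw [ih (s + 1) (acc ++ [l])]
      simp [PySem.List.enumerate_cons, h]

theorem process_markdown_eq (content : String) :
    process_markdown content = process_markdown_alt content := by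
  simp only [process_markdown, process_markdown_alt]
  rw [pvMain ((PySem.Str.split? content "\n").getD []) 0 []]
  simp

-- ===== VERDICT (by name: the statement is the Claim_ definition above) =====
theorem process_markdown_spec : Claim_equal_process_markdown := by
  intro content _
  unfold Spec_process_markdown
  exact process_markdown_eq content
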